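-- pv_equiv track=rewrite | github.com/merge3301/PiAA | lab5/src/joker.py | get_sub_patterns
-- ===== SOURCE A (Python) =====
-- def get_sub_patterns(pattern: str, joker: str) -> dict[str, list[int]]:
--     patterns: dict[str, list[int]] = {}
--     j = -1
--
--     for i in range(len(pattern)):
--         if pattern[i] == joker:
--             if j < i - 1:
--                 s = pattern[j + 1 : i]
--                 if s not in patterns.keys():
--                     patterns[s] = []
--                 patterns[s].append(j + 1)
--             j = i
--
--     if j != len(pattern) - 1:
--         s = pattern[j + 1 :]
--         if s not in patterns.keys():
--             patterns[s] = []
--         patterns[s].append(j + 1)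
--
--     return patterns
-- ===== SOURCE B (Python) =====
-- def get_sub_patterns(pattern: str, joker: str) -> dict[str, list[int]]:
--     # Recursively cut the pattern at the first joker occurrence, collecting the
--     # non-empty fragments with their absolute start offsets; then build the dict
--     # in one group-by comprehension over the fragment list.
--     def segments(s: str, off: int) -> list[tuple[str, int]]:
--         for i, c in enumerate(s):
--             if c == joker:
--                 head = [(s[:i], off)] if i > 0 else []
--                 return head + segments(s[i + 1:], off + i + 1)
--         return [(s, off)] if s else []
--
--     segs = segments(pattern, 0)
--     keys = dict.fromkeys(k for k, _ in segs)
--     return {k: [st for k2, st in segs if k2 == k] for k in keys}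
-- ===== Notes on version B (the rewrite author's own statement) =====
-- stated objective: alternative
-- what changed: B recursively cuts the string at the first joker occurrence to produce a flat fragment/offset list, then builds the dict in a separate group-by (dedup keys + filter comprehension), instead of A's single indexed loop carrying last-joker state into an incrementally updated dict plus a trailing block.
import Mathlib
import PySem

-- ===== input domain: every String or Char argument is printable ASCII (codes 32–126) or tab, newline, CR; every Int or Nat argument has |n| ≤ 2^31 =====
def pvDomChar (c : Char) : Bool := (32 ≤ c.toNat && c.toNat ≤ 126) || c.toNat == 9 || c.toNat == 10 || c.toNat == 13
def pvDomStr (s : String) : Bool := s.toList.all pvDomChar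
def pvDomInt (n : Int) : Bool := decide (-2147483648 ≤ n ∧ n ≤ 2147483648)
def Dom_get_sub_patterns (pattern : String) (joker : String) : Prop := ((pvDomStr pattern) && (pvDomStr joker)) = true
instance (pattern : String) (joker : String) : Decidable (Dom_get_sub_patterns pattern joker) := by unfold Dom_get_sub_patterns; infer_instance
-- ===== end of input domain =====

-- B replaces A's single indexed loop (incremental dict updates driven by a carried last-joker
-- index, plus a trailing block) by recursive first-joker cutting that yields a flat
-- fragment/offset list, followed by a separate group-by (dedup of keys + filter per key);
-- same result, different algorithmic decomposition ("alternative").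
-- Dict keys are kept as List Char internally (Python string equality = list-of-chars equality)
-- and rendered to String in the returned items list.

-- ===== PORT A =====
-- loop body: for i in range(len(pattern)): if pattern[i] == joker: if j < i-1: insert segment; j = i
def getSubStepA (cs jk : List Char) (st : PySem.Dict (List Char) (List Int) × Int) (i : Int) :
    PySem.Dict (List Char) (List Int) × Int :=
  if [PySem.List.pyGetD cs i ' '] == jk then
    if st.2 < i - 1 then
      let s := PySem.List.slice cs (some (st.2 + 1)) (some i)
      let d1 := if st.1.contains s then st.1 else st.1.insert s []
      (d1.modify s [] (fun v => v ++ [st.2 + 1]), i)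
    else (st.1, i)
  else st

-- trailing block: if j != len(pattern) - 1: insert pattern[j+1:]
def getSubFinishA (cs : List Char) (r : PySem.Dict (List Char) (List Int) × Int) :
    PySem.Dict (List Char) (List Int) :=
  if r.2 ≠ (cs.length : Int) - 1 then
    let s := PySem.List.slice cs (some (r.2 + 1)) none
    let d1 := if r.1.contains s then r.1 else r.1.insert s []
    d1.modify s [] (fun v => v ++ [r.2 + 1])
  else r.1

def get_sub_patterns (pattern : String) (joker : String) : List (String × List Int) :=
  let cs := pattern.toList
  let r := (PySem.List.pyRange 0 (cs.length : Int) 1).foldl (getSubStepA cs joker.toList)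
             (PySem.Dict.empty, -1)
  (getSubFinishA cs r).items.map (fun p => (String.ofList p.1, p.2))

-- ===== PORT B =====
-- the scan 'for i, c in enumerate(s): if c == joker: …' — index of the first joker char, if any
def findJok (jk : List Char) : List Char → Option Nat
  | [] => none
  | c :: t => if [c] == jk then some 0 else (findJok jk t).map (· + 1)

-- needed by segsB's termination argument
lemma findJok_some_lt (jk : List Char) :
    ∀ (t : List Char) (i : Nat), findJok jk t = some i → i < t.length := by
  intro t
  induction t with
  | nil => intro i h; simp [findJok] at h
  | cons c t ih =>
      intro i h
      by_cases hc : [c] == jk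
      · simp [findJok, hc] at h
        subst h
        simp
      · simp only [findJok, hc, Bool.false_eq_true, if_false, Option.map_eq_some_iff] at h
        obtain ⟨i', hi', rfl⟩ := h
        have := ih i' hi'
        simp only [List.length_cons]
        omega

-- def segments(s, off): find first joker at i → head (if i > 0) + segments(s[i+1:], off+i+1);
-- no joker → [(s, off)] if s else []
def segsB (jk : List Char) (t : List Char) (off : Int) : List (List Char × Int) :=
  match h : findJok jk t with
  | some i =>
      (if 0 < i then [(PySem.List.slice t none (some (i : Int)), off)] else []) ++
      segsB jk (PySem.List.slice t (some ((i + 1 : Nat) : Int)) none) (off + i + 1)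
  | none => if t ≠ [] then [(t, off)] else []
termination_by t.length
decreasing_by
  have hi := findJok_some_lt jk t i h
  rw [PySem.List.slice_from_natCast]
  simp
  omega

def get_sub_patterns_alt (pattern : String) (joker : String) : List (String × List Int) :=
  let segs := segsB joker.toList pattern.toList 0
  let keys := PySem.List.dedup (segs.map Prod.fst)
  keys.map (fun k => (String.ofList k, (segs.filter (fun p => p.1 == k)).map Prod.snd))

-- ===== PRECONDITION & SPEC =====
def Spec_get_sub_patterns (pattern : String) (joker : String) (out : List (String × List Int)) : Prop := out = get_sub_patterns_alt pattern joker
instance (pattern : String) (joker : String) (out : List (String × List Int)) : Decidable (Spec_get_sub_patterns pattern joker out) := by unfold Spec_get_sub_patterns; infer_instance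

-- ===== CLAIM (what is proved, stated in full; the proofs are below) =====
def Claim_equal_get_sub_patterns : Prop := ∀ (pattern : String) (joker : String), Dom_get_sub_patterns pattern joker → Spec_get_sub_patterns pattern joker (get_sub_patterns pattern joker)

-- ===== LEMMAS AND PROOFS =====

-- joker indices of t, indexed starting at k (proof-side characterisation of the boundaries)
def jokIdx (jk : List Char) : List Char → Int → List Int
  | [], _ => []
  | c :: t, k => if [c] == jk then k :: jokIdx jk t (k + 1) else jokIdx jk t (k + 1)

-- consecutive pairs of a boundary list
def segPairs (j : Int) : List Int → List (Int × Int)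
  | [] => []
  | x :: t => (j, x) :: segPairs x t

-- proof-side per-boundary-pair step (setdefault + append, as A effectively performs it)
def pairStep (cs : List Char) (d : PySem.Dict (List Char) (List Int)) (ab : Int × Int) :
    PySem.Dict (List Char) (List Int) :=
  if ab.2 > ab.1 + 1 then
    let s := PySem.List.slice cs (some (ab.1 + 1)) (some ab.2)
    (d.setdefault s []).modify s [] (fun v => v ++ [ab.1 + 1])
  else d

-- proof-side grouping step (plain modify-append)
def grpStep (d : PySem.Dict (List Char) (List Int)) (p : List Char × Int) :
    PySem.Dict (List Char) (List Int) :=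
  d.modify p.1 [] (fun v => v ++ [p.2])

-- the fragment/offset list named by a boundary-pair list
def segListOf (cs : List Char) (ps : List (Int × Int)) : List (List Char × Int) :=
  ps.filterMap (fun ab =>
    if ab.2 > ab.1 + 1 then some (PySem.List.slice cs (some (ab.1 + 1)) (some ab.2), ab.1 + 1)
    else none)

-- A's key-ensuring insert equals setdefault
lemma insert_ensure_eq_setdefault (d : PySem.Dict (List Char) (List Int)) (s : List Char) :
    (if d.contains s then d else d.insert s []) = d.setdefault s [] := by
  by_cases h : d.contains s = true
  · rw [PySem.Dict.setdefault_of_contains d ([] : List Int) h]; simp [h]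
  · have h' : d.contains s = false := by simpa using h
    rw [PySem.Dict.setdefault_of_not_contains d ([] : List Int) h']; simp [h']

-- setdefault before a modify with the same default is redundant
lemma setdefault_modify (d : PySem.Dict (List Char) (List Int)) (k : List Char) (v : Int) :
    (d.setdefault k []).modify k [] (fun w => w ++ [v]) = d.modify k [] (fun w => w ++ [v]) := by
  by_cases h : d.contains k = true
  · rw [PySem.Dict.setdefault_of_contains d [] h]
  · have h' : d.contains k = false := by simpa using h
    rw [PySem.Dict.setdefault_of_not_contains d [] h']
    simp [PySem.Dict.modify, h', PySem.Dict.getD_insert_self, PySem.Dict.insert_insert_self,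
      PySem.Dict.getD_of_not_contains]

-- main invariant: A's loop from index a with last-joker state j, followed by the trailing
-- block, equals the boundary-pair fold over the remaining region
lemma main_inv (cs jk : List Char) :
    ∀ (t : List Char) (a : Nat) (d : PySem.Dict (List Char) (List Int)) (j : Int),
      cs.drop a = t → a ≤ cs.length → j + 1 ≤ (a : Int) → -1 ≤ j →
      getSubFinishA cs
          ((PySem.List.pyRange (a : Int) (cs.length : Int) 1).foldl (getSubStepA cs jk) (d, j))
        = (segPairs j (jokIdx jk t (a : Int) ++ [(cs.length : Int)])).foldl (pairStep cs) d := by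
  intro t
  induction t with
  | nil =>
      intro a d j hdrop ha hj hj0
      have ha' : a = cs.length := by
        have := List.drop_eq_nil_iff.mp hdrop
        omega
      subst ha'
      rw [PySem.List.pyRange_one_eq_nil (by omega)]
      simp only [List.foldl_nil, jokIdx, List.nil_append, segPairs, List.foldl_cons,
        getSubFinishA, pairStep]
      by_cases hc : j = (cs.length : Int) - 1
      · have h2 : ¬ ((cs.length : Int) > j + 1) := by omega
        rw [if_neg (by omega : ¬ ¬ j = (cs.length : Int) - 1), if_neg h2]
      · have hgt : ((cs.length : Int) > j + 1) := by omega
        have hslice : PySem.List.slice cs (some (j + 1)) none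
            = PySem.List.slice cs (some (j + 1)) (some (cs.length : Int)) := by
          have hlen : (cs.drop (j + 1).toNat).length
              ≤ ((cs.length : Int)).toNat - (j + 1).toNat := by
            rw [List.length_drop]; omega
          rw [PySem.List.slice_from cs (by omega), PySem.List.slice_toNat cs (by omega) (by omega)]
          rw [List.take_of_length_le hlen]
        rw [if_pos hc, if_pos hgt, hslice, insert_ensure_eq_setdefault]
  | cons c t' ih =>
      intro a d j hdrop ha hj hj0
      have hlt : a < cs.length := by
        by_contra h
        rw [List.drop_eq_nil_iff.mpr (by omega)] at hdrop
        exact (List.cons_ne_nil c t') hdrop.symm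
      have hdrop' : cs.drop (a + 1) = t' := by
        have h1 := congrArg (List.drop 1) hdrop
        rw [List.drop_drop] at h1
        simpa [Nat.add_comm] using h1
      have hget : cs[a]? = some c := by
        have : (cs.drop a)[0]? = some c := by rw [hdrop]; rfl
        rw [List.getElem?_drop] at this
        simpa using this
      have hgetD : PySem.List.pyGetD cs (a : Int) ' ' = c := by
        rw [PySem.List.pyGetD_natCast]
        simp [List.getD, hget]
      rw [PySem.List.pyRange_one_cons (by exact_mod_cast hlt), List.foldl_cons]
      have hcast : ((a : Int) + 1) = ((a + 1 : Nat) : Int) := by push_cast; ring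
      by_cases hjk : [c] == jk
      · -- joker at index a
        simp only [jokIdx, hjk, if_pos, segPairs, List.cons_append, List.foldl_cons]
        by_cases hlt2 : j < (a : Int) - 1
        · simp only [getSubStepA, hgetD, hjk, if_pos, if_pos hlt2]
          rw [hcast, ih (a + 1) _ (a : Int) hdrop' (by omega) (by push_cast; omega) (by omega)]
          simp only [pairStep, if_pos (by omega : (a : Int) > j + 1),
            insert_ensure_eq_setdefault]
        · simp only [getSubStepA, hgetD, hjk, if_pos, if_neg hlt2]
          rw [hcast, ih (a + 1) _ (a : Int) hdrop' (by omega) (by push_cast; omega) (by omega)]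
          simp only [pairStep, if_neg (by omega : ¬ ((a : Int) > j + 1))]
      · -- not a joker: state unchanged
        have hjk' : ([c] == jk) = false := by simpa using hjk
        simp only [jokIdx, hjk', Bool.false_eq_true]
        simp only [getSubStepA, hgetD, hjk', Bool.false_eq_true, if_false]
        rw [hcast, ih (a + 1) d j hdrop' (by omega) (by push_cast; omega) hj0]

-- a boundary-pair fold is the grouping fold over the named fragments
lemma pairs_to_group (cs : List Char) :
    ∀ (ps : List (Int × Int)) (d : PySem.Dict (List Char) (List Int)),
      ps.foldl (pairStep cs) d = (segListOf cs ps).foldl grpStep d := by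
  intro ps
  induction ps with
  | nil => intro d; simp [segListOf]
  | cons ab ps ih =>
      intro d
      by_cases h : ab.2 > ab.1 + 1
      · simp only [segListOf, List.filterMap_cons, if_pos h, List.foldl_cons]
        rw [ih]
        simp only [pairStep, if_pos h, grpStep, setdefault_modify]
        rfl
      · simp only [segListOf, List.filterMap_cons, if_neg h, List.foldl_cons]
        rw [ih]
        simp only [pairStep, if_neg h]
        rfl

-- no joker in t → no boundary indices
lemma findJok_none_jokIdx (jk : List Char) :
    ∀ (t : List Char), findJok jk t = none → ∀ k, jokIdx jk t k = [] := by
  intro t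
  induction t with
  | nil => intro _ k; simp [jokIdx]
  | cons c t ih =>
      intro h k
      by_cases hc : [c] == jk
      · simp [findJok, hc] at h
      · simp only [findJok, hc, Bool.false_eq_true, if_false, Option.map_eq_none_iff] at h
        have hc' : ([c] == jk) = false := by simpa using hc
        simp [jokIdx, hc', ih h]

-- first joker at i → the boundary list decomposes at i
lemma findJok_some_jokIdx (jk : List Char) :
    ∀ (t : List Char) (i : Nat), findJok jk t = some i →
      ∀ k : Int, jokIdx jk t k = (k + i) :: jokIdx jk (t.drop (i + 1)) (k + i + 1) := by
  intro t
  induction t with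
  | nil => intro i h; simp [findJok] at h
  | cons c t ih =>
      intro i h k
      by_cases hc : [c] == jk
      · simp [findJok, hc] at h
        subst h
        simp [jokIdx, hc]
      · have hc' : ([c] == jk) = false := by simpa using hc
        simp only [findJok, hc', Bool.false_eq_true, if_false, Option.map_eq_some_iff] at h
        obtain ⟨i', hi', rfl⟩ := h
        have := ih i' hi' (k + 1)
        simp only [jokIdx, hc', Bool.false_eq_true, if_false, this]
        have h1 : k + 1 + (i' : Int) = k + (i' + 1 : Nat) := by push_cast; ring
        have h2 : (c :: t).drop (i' + 1 + 1) = t.drop (i' + 1) := by simp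
        rw [h1, h2]

-- unfolding lemmas for segsB (its match names the scrutinee for termination)
lemma segsB_none (jk t : List Char) (off : Int) (hf : findJok jk t = none) :
    segsB jk t off = if t ≠ [] then [(t, off)] else [] := by
  rw [segsB]
  split
  · rename_i i hi
    rw [hf] at hi
    cases hi
  · rfl

lemma segsB_some (jk t : List Char) (off : Int) (i : Nat) (hf : findJok jk t = some i) :
    segsB jk t off
      = (if 0 < i then [(PySem.List.slice t none (some (i : Int)), off)] else []) ++
        segsB jk (PySem.List.slice t (some ((i + 1 : Nat) : Int)) none) (off + i + 1) := by
  rw [segsB]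
  split
  · rename_i i' hi'
    rw [hf] at hi'
    injection hi' with h
    subst h
    rfl
  · rename_i hi'
    rw [hf] at hi'
    cases hi'

-- B's recursive cutting computes exactly the fragments named by the boundary pairs
lemma segsB_eq (cs jk : List Char) :
    ∀ (n : Nat) (t : List Char) (a : Nat), t.length = n → cs.drop a = t → a ≤ cs.length →
      segListOf cs (segPairs ((a : Int) - 1) (jokIdx jk t (a : Int) ++ [(cs.length : Int)]))
        = segsB jk t (a : Int) := by
  intro n
  induction n using Nat.strong_induction_on with
  | _ n ih =>
      intro t a hn hdrop ha
      match hf : findJok jk t with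
      | none =>
          rw [findJok_none_jokIdx jk t hf, segsB_none jk t _ hf]
          simp only [List.nil_append, segPairs, segListOf, List.filterMap_cons,
            List.filterMap_nil]
          by_cases ht : t = []
          · subst ht
            have : a = cs.length := by
              have := List.drop_eq_nil_iff.mp hdrop; omega
            subst this
            rw [if_neg (by omega : ¬ ((cs.length : Int) > (cs.length : Int) - 1 + 1))]
            simp
          · have hlt : a < cs.length := by
              by_contra hcon
              rw [List.drop_eq_nil_iff.mpr (by omega)] at hdrop
              exact ht hdrop.symm
            have hlen : t.length ≤ cs.length - a := by
              have := congrArg List.length hdrop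
              simp only [List.length_drop] at this
              omega
            rw [if_pos (by omega : (cs.length : Int) > (a : Int) - 1 + 1)]
            have h1 : (a : Int) - 1 + 1 = ((a : Nat) : Int) := by ring
            have hsl : PySem.List.slice cs (some ((a : Nat) : Int)) (some (cs.length : Int))
                = t := by
              rw [PySem.List.slice_natCast, hdrop]
              exact List.take_of_length_le hlen
            rw [h1, hsl, if_pos ht]
      | some i =>
          have hi : i < t.length := findJok_some_lt jk t i hf
          have hlt : a < cs.length := by
            by_contra hcon
            rw [List.drop_eq_nil_iff.mpr (by omega)] at hdrop
            rw [← hdrop] at hi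
            simp at hi
          have hlen : t.length = cs.length - a := by
            have := congrArg List.length hdrop
            simp only [List.length_drop] at this
            omega
          rw [findJok_some_jokIdx jk t i hf, segsB_some jk t _ i hf]
          -- tail fragments, by the induction hypothesis at a + i + 1
          have hdrop2 : cs.drop (a + i + 1) = t.drop (i + 1) := by
            rw [← hdrop, List.drop_drop]
            congr 1
          have htail := ih (t.drop (i + 1)).length (by simp; omega) (t.drop (i + 1))
            (a + i + 1) rfl hdrop2 (by omega)
          have hcast1 : ((a + i + 1 : Nat) : Int) - 1 = (a : Int) + i := by push_cast; ring
          have hcast2 : ((a + i + 1 : Nat) : Int) = (a : Int) + i + 1 := by push_cast; ring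
          rw [hcast1, hcast2] at htail
          have hslt : PySem.List.slice t (some ((i + 1 : Nat) : Int)) none = t.drop (i + 1) :=
            PySem.List.slice_from_natCast t (i + 1)
          rw [hslt, ← htail]
          simp only [segPairs, List.cons_append, segListOf, List.filterMap_cons]
          by_cases hi0 : 0 < i
          · rw [if_pos (by omega : (a : Int) + i > (a : Int) - 1 + 1)]
            have hsl1 : PySem.List.slice cs (some ((a : Int) - 1 + 1)) (some ((a : Int) + i))
                = PySem.List.slice t none (some (i : Int)) := by
              have h1 : (a : Int) - 1 + 1 = ((a : Nat) : Int) := by ring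
              have h2 : (a : Int) + (i : Int) = ((a + i : Nat) : Int) := by push_cast; ring
              rw [h1, h2, PySem.List.slice_natCast, PySem.List.slice_to_natCast, ← hdrop]
              congr 1
              omega
            rw [if_pos hi0]
            simp only [List.singleton_append]
            rw [hsl1]
            have h1 : (a : Int) - 1 + 1 = ((a : Nat) : Int) := by ring
            rw [h1]
          · rw [if_neg (by omega : ¬ ((a : Int) + i > (a : Int) - 1 + 1)), if_neg hi0]
            simp only [List.nil_append]

-- the grouping fold, read back as items: dedup'd keys with their grouped offsets
lemma group_items (segs : List (List Char × Int)) :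
    (segs.foldl grpStep PySem.Dict.empty).items
      = (PySem.List.dedup (segs.map Prod.fst)).map
          (fun k => (k, (segs.filter (fun p => p.1 == k)).map Prod.snd)) := by
  have hnd : (segs.foldl grpStep PySem.Dict.empty).keys.Nodup := by
    simpa [grpStep] using
      PySem.Dict.nodup_keys_foldl_modify_key segs Prod.fst ([] : List Int)
        (fun _d p => fun v => v ++ [p.2]) PySem.Dict.empty (by simp)
  have hkeys : (segs.foldl grpStep PySem.Dict.empty).keys
      = PySem.Set.ofList (segs.map Prod.fst) := by
    have := PySem.Dict.keys_foldl_modify_key segs Prod.fst ([] : List Int)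
      (fun _d p => fun v => v ++ [p.2]) PySem.Dict.empty
    simpa [grpStep, PySem.Set.update, PySem.Set.ofList_eq_foldl] using this
  rw [PySem.Dict.items_eq_map_keys _ hnd ([] : List Int), hkeys]
  simp only [PySem.List.dedup_eq_ofList]
  apply List.map_congr_left
  intro k hk
  congr 1
  have := PySem.Dict.getD_foldl_modify_append segs PySem.Dict.empty k
  simpa [grpStep] using this

-- ===== VERDICT (by name: the statement is the Claim_ definition above) =====
theorem get_sub_patterns_spec : Claim_equal_get_sub_patterns := by
  intro pattern joker _
  unfold Spec_get_sub_patterns get_sub_patterns get_sub_patterns_alt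
  dsimp only
  rw [show ((0 : Int)) = ((0 : Nat) : Int) from rfl,
    main_inv pattern.toList joker.toList pattern.toList 0 PySem.Dict.empty (-1)
      (by simp) (by omega) (by omega) (by omega)]
  rw [pairs_to_group]
  rw [show (-1 : Int) = ((0 : Nat) : Int) - 1 by norm_num] at *
  rw [segsB_eq pattern.toList joker.toList pattern.toList.length pattern.toList 0 rfl
    (by simp) (by omega)]
  rw [group_items]
  simp [List.map_map, Function.comp]
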